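-- pv_equiv track=rewrite | github.com/seohyun8825/leetcode | 1012-numbers-with-repeated-digits/1012-numbers-with-repeated-digits.py | numDupDigitsAtMostN
-- ===== SOURCE A (Python) =====
-- from math import factorial
--
-- def numDupDigitsAtMostN(n: int) -> int:
--     def count_unique_digits(limit: int) -> int:
--         digits = list(map(int, str(limit + 1)))
--         length = len(digits)
--
--
--         unique_count = 0
--
--         for i in range(1, length):
--             unique_count += 9 * permutations(9, i - 1)
--
--         seen = set()
--         for i in range(length):
--             for x in range(1 if i == 0 else 0, digits[i]):
--                 if x in seen:
--                     continue
--                 unique_count += permutations(9 - i, length - i - 1)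
--             if digits[i] in seen:
--                 break
--             seen.add(digits[i])
--
--         return unique_count
--
--     def permutations(m: int, k: int) -> int:
--
--         if k > m:
--             return 0
--         return factorial(m) // factorial(m - k)
--
--     total_count = n
--     unique_count = count_unique_digits(n)
--     return total_count - unique_count
-- ===== SOURCE B (Python) =====
-- def numDupDigitsAtMostN(n: int) -> int:
--     ds = [int(c) for c in str(n + 1)]
--     L = len(ds)
--
--     # tables[k][mask]: fillings of k positions with distinct digits, none already in mask
--     tables = [[1] * 1024]
--     for _ in range(L):
--         prev = tables[-1]
--         tables.append([sum(prev[m | (1 << d)] for d in range(10) if not (m >> d) & 1)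
--                        for m in range(1024)])
--
--     # h[k]: count of distinct-digit numbers with at most k digits (numbers in [1, 10**k - 1])
--     h = [0]
--     for k in range(1, L + 1):
--         h.append(h[k - 1] + sum(tables[k - 1][1 << d] for d in range(1, 10)))
--
--     total = 0
--     mask = 0
--     started = False
--     for i in range(L):
--         di = ds[i]
--         rem = L - i - 1
--         for d in range(di):
--             if not started and d == 0:
--                 total += h[rem]
--             elif not (mask >> d) & 1:
--                 total += tables[rem][mask | (1 << d)]
--         if not started and di == 0:
--             continue
--         if (mask >> di) & 1:
--             break
--         mask |= 1 << di
--         started = True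
--     return n - total
-- ===== Notes on version B (the rewrite author's own statement) =====
-- stated objective: alternative
-- what changed: A counts distinct-digit numbers via closed-form factorial permutation terms P(m,k)=m!/(m-k)! per prefix; B replaces that by a digit DP: bottom-up tables counting distinct-digit completions per (positions left, used-digit bitmask) plus a precomputed shorter-number table, consumed by one tight walk over the digits of n+1.
-- outside the precondition, e.g. on numDupDigitsAtMostN(-2): A raises ValueError, B raises ValueError
import Mathlib
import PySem

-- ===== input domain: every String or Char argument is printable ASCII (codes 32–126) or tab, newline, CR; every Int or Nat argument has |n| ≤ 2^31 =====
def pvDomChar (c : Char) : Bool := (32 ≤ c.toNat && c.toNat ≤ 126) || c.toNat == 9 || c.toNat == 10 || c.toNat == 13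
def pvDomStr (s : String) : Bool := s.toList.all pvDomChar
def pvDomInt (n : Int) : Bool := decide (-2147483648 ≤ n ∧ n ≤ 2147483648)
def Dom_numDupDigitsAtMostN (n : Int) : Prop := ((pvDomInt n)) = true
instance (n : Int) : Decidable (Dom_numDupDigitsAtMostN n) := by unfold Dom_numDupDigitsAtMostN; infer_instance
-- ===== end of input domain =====

-- B replaces A's closed-form permutation counting by a digit-DP: bottom-up
-- count tables indexed by (positions left, used-digit bitmask) plus one tight
-- walk along the digits of n+1 (objective: alternative algorithm, same cost class).

-- ===== PORT A =====
-- digits = list(map(int, str(m))): int(c) on a decimal digit char is its code minus 48 (exact here: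
-- under Pre_ the string is the decimal repr of a nonnegative int, so every char is '0'..'9')
def pyDigits (m : Int) : List Int := (PySem.Int.toChars m).map (fun c => ((c.toNat : Int) - 48))

-- math.factorial (argument is always ≥ 0 under Pre_; .toNat is exact there)
def pvFact (m : Int) : Int := (Nat.factorial m.toNat : Int)

def pvPerm (m k : Int) : Int := if k > m then 0 else PySem.Int.floordiv (pvFact m) (pvFact (m - k))

-- the second 'for i in range(length)' loop of count_unique_digits (with its break)
def aLoop (len : Int) : List Int → Int → PySem.Set Int → Int → Int
  | [], _, _, acc => acc
  | d :: rest, i, seen, acc =>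
    let acc' := (PySem.List.pyRange (if i == 0 then 1 else 0) d 1).foldl
        (fun a x => if PySem.Set.contains seen x then a else a + pvPerm (9 - i) (len - i - 1)) acc
    if PySem.Set.contains seen d then acc'
    else aLoop len rest (i + 1) (PySem.Set.add seen d) acc'

def aCountUnique (limit : Int) : Int :=
  let digits := pyDigits (limit + 1)
  let len : Int := (digits.length : Int)
  let uc := (PySem.List.pyRange 1 len 1).foldl (fun a i => a + 9 * pvPerm 9 (i - 1)) 0
  aLoop len digits 0 PySem.Set.empty uc

def numDupDigitsAtMostN (n : Int) : Int := n - aCountUnique n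

-- ===== PORT B =====
-- next DP level: sum(prev[m | (1 << d)] for d in range(10) if not (m >> d) & 1) for each mask m
def bNext (prev : Array Int) : Array Int :=
  (Array.range 1024).map (fun m =>
    (((List.range 10).filter (fun d => !(m.testBit d))).map
        (fun d => prev.getD (m ||| (1 <<< d)) 0)).sum)

-- tables = [[1]*1024]; for _ in range(L): tables.append(next level of tables[-1])
def bTables (L : Nat) : List (Array Int) :=
  (List.range L).foldl (fun ts _ => ts ++ [bNext (ts.getLastD (Array.replicate 1024 1))])
    [Array.replicate 1024 1]

-- h = [0]; for k in range(1, L+1): h.append(h[-1] + sum over first digits 1..9)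
def bHList (tables : List (Array Int)) (L : Nat) : List Int :=
  (List.range' 1 L).foldl (fun hs k =>
      hs ++ [hs.getLastD 0 +
        ((List.range' 1 9).map (fun d => (tables.getD (k - 1) #[]).getD (1 <<< d) 0)).sum]) [0]

-- the tight walk over the digits (mask of used digits, started = a nonzero digit was placed)
def bWalk (L : Nat) (tables : List (Array Int)) (hs : List Int) :
    List Int → Nat → Nat → Bool → Int → Int
  | [], _, _, _, total => total
  | di :: rest, i, mask, started, total =>
    let rem := L - i - 1
    let total' := (PySem.List.pyRange 0 di 1).foldl
      (fun (t : Int) (d : Int) =>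
        if !started && d == 0 then t + hs.getD rem 0
        else if !(mask.testBit d.toNat) then
          t + (tables.getD rem #[]).getD (mask ||| (1 <<< d.toNat)) 0
        else t) total
    if !started && di == 0 then bWalk L tables hs rest (i + 1) mask started total'
    else if mask.testBit di.toNat then total'
    else bWalk L tables hs rest (i + 1) (mask ||| (1 <<< di.toNat)) true total'

def numDupDigitsAtMostN_alt (n : Int) : Int :=
  let ds := pyDigits (n + 1)
  let L := ds.length
  let tables := bTables L
  let hs := bHList tables L
  n - bWalk L tables hs ds 0 0 false 0

-- ===== PRECONDITION & SPEC =====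
-- Pre_ excludes exactly n ≤ -2, where str(n+1) contains '-' and int('-') raises ValueError in A
-- (B raises there too).
def Pre_numDupDigitsAtMostN (n : Int) : Prop := -1 ≤ n
instance (n : Int) : Decidable (Pre_numDupDigitsAtMostN n) := by
  unfold Pre_numDupDigitsAtMostN; infer_instance

def pvWitness_numDupDigitsAtMostN : Int := 157

def Spec_numDupDigitsAtMostN (n : Int) (out : Int) : Prop := out = numDupDigitsAtMostN_alt n
instance (n : Int) (out : Int) : Decidable (Spec_numDupDigitsAtMostN n out) := by
  unfold Spec_numDupDigitsAtMostN; infer_instance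

-- ===== CLAIM (what is proved, stated in full; the proofs are below) =====
def Claim_equal_numDupDigitsAtMostN : Prop :=
  ∀ (n : Int), Dom_numDupDigitsAtMostN n → Pre_numDupDigitsAtMostN n →
    Spec_numDupDigitsAtMostN n (numDupDigitsAtMostN n)

-- ===== LEMMAS AND PROOFS =====

-- ---- decimal digit characterization (A and B share the digit extraction) ----

theorem toDigitsCore_append (f n : Nat) : ∀ ds : List Char,
    Nat.toDigitsCore 10 f n ds = Nat.toDigitsCore 10 f n [] ++ ds := by
  induction f generalizing n with
  | zero => intro ds; simp [Nat.toDigitsCore]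
  | succ f ih =>
    intro ds
    simp only [Nat.toDigitsCore]
    by_cases h : n / 10 = 0
    · simp [h]
    · simp only [h, if_false]
      rw [ih (n / 10) (Nat.digitChar (n % 10) :: ds), ih (n / 10) [Nat.digitChar (n % 10)]]
      simp

theorem toDigitsCore_fuel (f₁ f₂ n : Nat) (h₁ : n < f₁) (h₂ : n < f₂) (ds : List Char) :
    Nat.toDigitsCore 10 f₁ n ds = Nat.toDigitsCore 10 f₂ n ds := by
  induction f₁ generalizing f₂ n ds with
  | zero => omega
  | succ f₁ ih =>
    cases f₂ with
    | zero => omega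
    | succ f₂ =>
      simp only [Nat.toDigitsCore]
      by_cases h : n / 10 = 0
      · simp [h]
      · simp only [h, if_false]
        have hn : 0 < n := by omega
        have := Nat.div_lt_self hn (by norm_num : 1 < 10)
        apply ih <;> omega

theorem toDigits_lt (n : Nat) (h : n < 10) : Nat.toDigits 10 n = [Nat.digitChar n] := by
  unfold Nat.toDigits
  simp [Nat.toDigitsCore, Nat.div_eq_of_lt h, Nat.mod_eq_of_lt h]

theorem toDigits_ge (n : Nat) (h : 10 ≤ n) :
    Nat.toDigits 10 n = Nat.toDigits 10 (n / 10) ++ [Nat.digitChar (n % 10)] := by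
  unfold Nat.toDigits
  have h10 : ¬ n / 10 = 0 := by
    have := Nat.div_le_div_right (c := 10) h; omega
  conv_lhs => simp only [Nat.toDigitsCore, h10, if_false]
  rw [toDigitsCore_append, toDigitsCore_fuel n (n / 10 + 1) (n / 10)
    (by have := Nat.div_lt_self (by omega : 0 < n) (by norm_num : 1 < 10); omega) (by omega)]

theorem digitChar_val (m : Nat) (h : m < 10) : ((Nat.digitChar m).toNat : Int) - 48 = (m : Int) := by
  interval_cases m <;> decide

def digitsNat (n : Nat) : List Int := (Nat.toDigits 10 n).map (fun c => ((c.toNat : Int) - 48))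

theorem digitsNat_lt (n : Nat) (h : n < 10) : digitsNat n = [(n : Int)] := by
  simp [digitsNat, toDigits_lt n h, digitChar_val n h]

theorem digitsNat_ge (n : Nat) (h : 10 ≤ n) :
    digitsNat n = digitsNat (n / 10) ++ [((n % 10 : Nat) : Int)] := by
  simp [digitsNat, toDigits_ge n h]
  exact digitChar_val (n % 10) (Nat.mod_lt n (by norm_num))

theorem digitsNat_mem (n : Nat) : ∀ d ∈ digitsNat n, 0 ≤ d ∧ d < 10 := by
  induction n using Nat.strong_induction_on with
  | _ n ih =>
    by_cases h : n < 10
    · rw [digitsNat_lt n h]; intro d hd; simp at hd; omega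
    · push_neg at h
      rw [digitsNat_ge n h]
      intro d hd
      rcases List.mem_append.mp hd with h1 | h1
      · exact ih (n / 10) (Nat.div_lt_self (by omega) (by norm_num)) d h1
      · simp at h1; subst h1
        omega

theorem digitsNat_head (n : Nat) (hn : 1 ≤ n) :
    ∃ h rest, digitsNat n = h :: rest ∧ 1 ≤ h ∧ h < 10 := by
  induction n using Nat.strong_induction_on with
  | _ n ih =>
    by_cases h : n < 10
    · exact ⟨n, [], digitsNat_lt n h, by exact_mod_cast hn, by exact_mod_cast h⟩
    · push_neg at h
      obtain ⟨hd, rest, heq, h1, h2⟩ := ih (n / 10) (Nat.div_lt_self (by omega) (by norm_num))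
        (by have := Nat.div_le_div_right (c := 10) h; omega)
      exact ⟨hd, rest ++ [((n % 10 : Nat) : Int)], by rw [digitsNat_ge n h, heq]; simp, h1, h2⟩

theorem pyDigits_eq (m : Int) (h : 0 ≤ m) : pyDigits m = digitsNat m.toNat := by
  unfold pyDigits PySem.Int.toChars digitsNat
  rw [if_neg (by omega)]

-- ---- A's permutations = descending factorial ----

theorem pvPerm_eq (a b : Nat) : pvPerm (a : Int) (b : Int) = (Nat.descFactorial a b : Int) := by
  unfold pvPerm pvFact
  by_cases h : a < b
  · rw [if_pos (by exact_mod_cast h), eq_comm]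
    norm_cast
    simpa [Nat.descFactorial_eq_zero_iff_lt] using h
  · push_neg at h
    rw [if_neg (by push_neg; exact_mod_cast h)]
    have : ((a : Int) - b).toNat = a - b := by omega
    rw [this]
    have := PySem.Int.floordiv_natCast (Nat.factorial a) (Nat.factorial (a - b))
    simp only [Int.toNat_natCast] at this ⊢
    rw [this, Nat.descFactorial_eq_div h]

-- ---- the DP tables compute descending factorials ----

-- number of digits 0..9 already used in a mask
def pcnt (m : Nat) : Nat := ((List.range 10).filter (fun d => m.testBit d)).length

-- the ideal value of DP row k at mask m
def rowVal (m k : Nat) : Int := (Nat.descFactorial (10 - pcnt m) k : Int)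

-- spec-side row sequence
def rowSeq : Nat → Array Int
  | 0 => Array.replicate 1024 1
  | k + 1 => bNext (rowSeq k)

-- the ideal h values: distinct-digit numbers with at most k digits
def hVal : Nat → Int
  | 0 => 0
  | k + 1 => hVal k + 9 * (Nat.descFactorial 9 k : Int)

set_option maxRecDepth 100000 in
theorem maskFact : ∀ m : Fin 1024, ∀ d : Fin 10, ¬ (Nat.testBit m.val d.val) →
    (pcnt (m.val ||| (1 <<< d.val)) = pcnt m.val + 1 ∧ m.val ||| (1 <<< d.val) < 1024 ∧
      pcnt m.val ≤ 9) := by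
  decide

set_option maxRecDepth 100000 in
theorem unsetFact : ∀ m : Fin 1024,
    ((List.range 10).filter (fun d => !(Nat.testBit m.val d))).length = 10 - pcnt m.val := by
  decide

set_option maxRecDepth 100000 in
theorem pcnt_one : ∀ d : Fin 10, pcnt (1 <<< d.val) = 1 ∧ (1 <<< d.val) < 1024 := by decide

theorem maskFact' (m d : Nat) (hm : m < 1024) (hd : d < 10) (h : ¬ Nat.testBit m d) :
    pcnt (m ||| (1 <<< d)) = pcnt m + 1 ∧ m ||| (1 <<< d) < 1024 ∧ pcnt m ≤ 9 :=
  maskFact ⟨m, hm⟩ ⟨d, hd⟩ h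

theorem unsetFact' (m : Nat) (hm : m < 1024) :
    ((List.range 10).filter (fun d => !(Nat.testBit m d))).length = 10 - pcnt m :=
  unsetFact ⟨m, hm⟩

theorem pcnt_one' (d : Nat) (hd : d < 10) : pcnt (1 <<< d) = 1 ∧ (1 <<< d) < 1024 :=
  pcnt_one ⟨d, hd⟩

theorem getD_replicate (m : Nat) (hm : m < 1024) :
    (Array.replicate 1024 (1 : Int)).getD m 0 = 1 := by
  simp [Array.getD, hm]

theorem getD_map_arange (f : Nat → Int) (m : Nat) (hm : m < 1024) :
    ((Array.range 1024).map f).getD m 0 = f m := by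
  simp [Array.getD, hm]

theorem listMapRange_getD {α : Type} (n i : Nat) (f : Nat → α) (d : α) (h : i < n) :
    ((List.range n).map f).getD i d = f i := by
  rw [List.getD_eq_getElem _ _ (by simpa using h)]
  simp

theorem rowSeq_getD (k : Nat) : ∀ m : Nat, m < 1024 → (rowSeq k).getD m 0 = rowVal m k := by
  induction k with
  | zero => intro m hm; simp [rowSeq, getD_replicate m hm, rowVal]
  | succ k ih =>
    intro m hm
    show (bNext (rowSeq k)).getD m 0 = _
    unfold bNext
    rw [getD_map_arange _ m hm]
    have hcong : ((List.range 10).filter (fun d => !(Nat.testBit m d))).map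
        (fun d => (rowSeq k).getD (m ||| (1 <<< d)) 0)
        = ((List.range 10).filter (fun d => !(Nat.testBit m d))).map
        (fun _ => (Nat.descFactorial (9 - pcnt m) k : Int)) := by
      apply List.map_congr_left
      intro d hd
      have hd10 : d < 10 := by simpa using (List.mem_filter.mp hd).1
      have hdbit : ¬ Nat.testBit m d := by simpa using (List.mem_filter.mp hd).2
      obtain ⟨hpc, hlt, hle⟩ := maskFact' m d hm hd10 hdbit
      rw [ih _ hlt, rowVal, hpc]
      have h9 : 10 - (pcnt m + 1) = 9 - pcnt m := by omega
      rw [h9]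
    rw [hcong, PySem.List.sum_map_const_int, unsetFact' m hm, rowVal]
    by_cases hp : pcnt m ≤ 9
    · have : 10 - pcnt m = (9 - pcnt m) + 1 := by omega
      rw [this, Nat.succ_descFactorial_succ]
      push_cast
      ring
    · have h1 : 10 - pcnt m = 0 := by
        have h2 : pcnt m ≤ 10 := by
          unfold pcnt
          have := List.length_filter_le (fun d => Nat.testBit m d) (List.range 10)
          simpa using this
        omega
      rw [h1]
      simp [Nat.descFactorial]

theorem getLastD_map_range {α : Type} (f : Nat → α) (n : Nat) (d : α) :
    ((List.range (n + 1)).map f).getLastD d = f n := by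
  rw [List.range_succ]
  simp

theorem bTables_eq (L : Nat) : bTables L = (List.range (L + 1)).map rowSeq := by
  induction L with
  | zero => simp [bTables, rowSeq]
  | succ L ih =>
    unfold bTables at ih ⊢
    conv_lhs => rw [List.range_succ]
    rw [List.foldl_append, ih]
    simp only [List.foldl_cons, List.foldl_nil]
    rw [getLastD_map_range]
    conv_rhs => rw [List.range_succ]
    simp [rowSeq]

theorem bTables_getD (L j : Nat) (hj : j ≤ L) : (bTables L).getD j #[] = rowSeq j := by
  rw [bTables_eq]
  exact listMapRange_getD (L + 1) j rowSeq #[] (by omega)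

theorem bHList_eq (L : Nat) : bHList (bTables L) L = (List.range (L + 1)).map hVal := by
  suffices h : ∀ (tables : List (Array Int)) (M : Nat), (∀ j, j < M → tables.getD j #[] = rowSeq j) →
      bHList tables M = (List.range (M + 1)).map hVal by
    exact h (bTables L) L (fun j hj => bTables_getD L j (by omega))
  intro tables M htab
  induction M with
  | zero => simp [bHList, hVal]
  | succ M ih =>
    unfold bHList at ih ⊢
    have hr : List.range' 1 (M + 1) = List.range' 1 M ++ [1 + 1 * M] := List.range'_concat
    rw [hr, List.foldl_append]
    rw [ih (fun j hj => htab j (by omega))]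
    simp only [List.foldl_cons, List.foldl_nil]
    rw [getLastD_map_range]
    have hsum : ((List.range' 1 9).map
        (fun d => (tables.getD (1 + 1 * M - 1) #[]).getD (1 <<< d) 0)).sum
        = 9 * (Nat.descFactorial 9 M : Int) := by
      have hM : 1 + 1 * M - 1 = M := by omega
      rw [hM]
      have : ((List.range' 1 9).map (fun d => (tables.getD M #[]).getD (1 <<< d) 0))
          = (List.range' 1 9).map (fun _ => (Nat.descFactorial 9 M : Int)) := by
        apply List.map_congr_left
        intro d hd
        have hd10 : 1 ≤ d ∧ d < 10 := by
          have := List.mem_range'_1.mp hd; omega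
        obtain ⟨hpc, hlt⟩ := pcnt_one' d (by omega)
        rw [htab M (by omega), rowSeq_getD M _ hlt, rowVal, hpc]
      rw [this, PySem.List.sum_map_const_int]
      simp
    rw [hsum]
    conv_rhs => rw [List.range_succ]
    simp only [List.map_append, List.map_cons, List.map_nil]
    have : hVal (M + 1) = hVal M + 9 * (Nat.descFactorial 9 M : Int) := rfl
    rw [this]

-- ---- A's first loop computes hVal ----

theorem aSum_eq (ℓ : Nat) :
    (PySem.List.pyRange 1 ((ℓ + 1 : Nat) : Int) 1).foldl
      (fun a i => a + 9 * pvPerm 9 (i - 1)) 0 = hVal ℓ := by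
  induction ℓ with
  | zero => rw [show (((0 : Nat) + 1 : Nat) : Int) = 1 by norm_num,
      PySem.List.pyRange_one_eq_nil (by omega)]; rfl
  | succ ℓ ih =>
    have hc : ((ℓ + 1 + 1 : Nat) : Int) = ((ℓ + 1 : Nat) : Int) + 1 := by push_cast; ring
    rw [hc, PySem.List.pyRange_one_succ_right (by omega), List.foldl_append, ih]
    simp only [List.foldl_cons, List.foldl_nil]
    have h1 : ((ℓ + 1 : Nat) : Int) - 1 = ((ℓ : Nat) : Int) := by push_cast; ring
    rw [h1]
    have h2 : pvPerm 9 ((ℓ : Nat) : Int) = (Nat.descFactorial 9 ℓ : Int) := by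
      exact_mod_cast pvPerm_eq 9 ℓ
    rw [h2]
    rfl

-- ---- membership bridges ----

theorem seen_invariant_step (seen : PySem.Set Int) (mask : Nat) (d : Int)
    (hd : 0 ≤ d ∧ d < 10)
    (hseen : ∀ x : Int, PySem.Set.contains seen x = true ↔
      (0 ≤ x ∧ x < 10 ∧ Nat.testBit mask x.toNat = true)) :
    ∀ x : Int, PySem.Set.contains (PySem.Set.add seen d) x = true ↔
      (0 ≤ x ∧ x < 10 ∧ Nat.testBit (mask ||| (1 <<< d.toNat)) x.toNat = true) := by
  intro x
  rw [PySem.Set.contains_iff, PySem.Set.mem_add]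
  rw [Nat.testBit_or, Nat.one_shiftLeft, Nat.testBit_two_pow]
  constructor
  · rintro (hx | hx)
    · have := (hseen x).mp (by rwa [PySem.Set.contains_iff])
      exact ⟨this.1, this.2.1, by simp [this.2.2]⟩
    · subst hx
      exact ⟨hd.1, hd.2, by simp⟩
  · rintro ⟨hx0, hx10, hbit⟩
    simp only [Bool.or_eq_true, decide_eq_true_eq] at hbit
    rcases hbit with hbit | hbit
    · exact Or.inl (by rw [← PySem.Set.contains_iff]; exact (hseen x).mpr ⟨hx0, hx10, hbit⟩)
    · right; omega

-- ---- the main loop correspondence: A's seen-loop = B's tight walk ----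

theorem loop_walk (L : Nat) :
    ∀ (rest : List Int) (i mask : Nat) (seen : PySem.Set Int) (acc : Int),
    (∀ d ∈ rest, 0 ≤ d ∧ d < 10) →
    i + rest.length = L →
    1 ≤ i →
    mask < 1024 →
    pcnt mask = i →
    (∀ x : Int, PySem.Set.contains seen x = true ↔
      (0 ≤ x ∧ x < 10 ∧ Nat.testBit mask x.toNat = true)) →
    aLoop (L : Int) rest (i : Int) seen acc
      = bWalk L (bTables L) (bHList (bTables L) L) rest i mask true acc := by
  intro rest
  induction rest with
  | nil => intro i mask seen acc _ _ _ _ _ _; simp [aLoop, bWalk]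
  | cons d r ih =>
    intro i mask seen acc hdig hlen hi hm hpc hseen
    have hd : 0 ≤ d ∧ d < 10 := hdig d (by simp)
    have hrdig : ∀ e ∈ r, 0 ≤ e ∧ e < 10 := fun e he => hdig e (by simp [he])
    have hiL : i + 1 + r.length = L := by simp at hlen; omega
    have hi0 : ((i : Int) == 0) = false := by simp; omega
    have hrem : L - i - 1 = r.length := by omega
    simp only [aLoop, bWalk, hi0, Bool.false_and, Bool.false_eq_true, if_false, Bool.not_true, hrem]
    have hfold : ∀ (acc0 : Int),
        (PySem.List.pyRange 0 d).foldl
          (fun (a x : Int) => if PySem.Set.contains seen x then a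
            else a + pvPerm (9 - (i : Int)) ((L : Int) - (i : Int) - 1)) acc0
        = (PySem.List.pyRange 0 d).foldl
          (fun (t x : Int) => if !true && x == 0 then t + (bHList (bTables L) L).getD (L - i - 1) 0
            else if !(Nat.testBit mask x.toNat) then
              t + ((bTables L).getD (L - i - 1) #[]).getD (mask ||| (1 <<< x.toNat)) 0
            else t) acc0 := by
      intro acc0
      apply PySem.List.foldl_congr_mem
      intro a x hx
      have hxb : 0 ≤ x ∧ x < d := PySem.List.mem_pyRange_one.mp hx
      have hx10 : x.toNat < 10 := by omega
      simp only [Bool.false_and, Bool.false_eq_true, if_false, Bool.not_true]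
      by_cases hc : PySem.Set.contains seen x = true
      · have hbit := ((hseen x).mp hc).2.2
        rw [if_pos hc, hbit]
        simp
      · have hbit : Nat.testBit mask x.toNat = false := by
          by_contra hb
          exact hc ((hseen x).mpr ⟨hxb.1, by omega, by simpa using hb⟩)
        rw [if_neg hc, hbit]
        simp only [Bool.not_false, if_true]
        obtain ⟨hpc', hlt', hle'⟩ := maskFact' mask x.toNat hm hx10 (by simp [hbit])
        rw [bTables_getD L (L - i - 1) (by omega), hrem,
          rowSeq_getD r.length _ hlt', rowVal, hpc', hpc]
        have hcast1 : (9 : Int) - (i : Int) = ((9 - i : Nat) : Int) := by omega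
        have hcast2 : (L : Int) - (i : Int) - 1 = ((r.length : Nat) : Int) := by omega
        rw [hcast1, hcast2, pvPerm_eq (9 - i) r.length]
        have : 10 - (i + 1) = 9 - i := by omega
        rw [this]
    rw [hrem] at hfold
    rw [hfold acc]
    by_cases hcd : PySem.Set.contains seen d = true
    · have hbit := ((hseen d).mp hcd).2.2
      rw [if_pos hcd, hbit]
      simp
    · have hbit : Nat.testBit mask d.toNat = false := by
        by_contra hb
        exact hcd ((hseen d).mpr ⟨hd.1, hd.2, by simpa using hb⟩)
      rw [if_neg hcd, hbit]
      simp only [Bool.false_eq_true, if_false]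
      obtain ⟨hpc', hlt', _⟩ := maskFact' mask d.toNat hm (by omega) (by simp [hbit])
      have hcast : (i : Int) + 1 = ((i + 1 : Nat) : Int) := by push_cast; ring
      rw [hcast]
      exact ih (i + 1) (mask ||| (1 <<< d.toNat)) (PySem.Set.add seen d) _
        hrdig hiL (by omega) hlt' (by rw [hpc', hpc])
        (seen_invariant_step seen mask d hd hseen)

-- ---- first position (i = 0, not started) and top-level assembly ----

theorem core_eq (d0 : Int) (rest : List Int) (h1 : 1 ≤ d0) (h2 : d0 < 10)
    (hr : ∀ e ∈ rest, 0 ≤ e ∧ e < 10) :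
    aLoop (((rest.length + 1 : Nat) : Int)) (d0 :: rest) 0 PySem.Set.empty (hVal rest.length)
      = bWalk (rest.length + 1) (bTables (rest.length + 1))
          (bHList (bTables (rest.length + 1)) (rest.length + 1)) (d0 :: rest) 0 0 false 0 := by
  set L := rest.length + 1 with hL
  have hd0nat : d0.toNat < 10 := by omega
  have hrem : L - 0 - 1 = rest.length := by omega
  have hd00 : (d0 == 0) = false := by simp; omega
  simp only [aLoop, bWalk, hrem, hd00, Bool.not_false, Bool.true_and, Bool.false_eq_true,
    if_false, if_true, Nat.zero_testBit, Nat.zero_or]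
  have hhs : (bHList (bTables L) L).getD rest.length 0 = hVal rest.length := by
    rw [bHList_eq L]
    exact listMapRange_getD (L + 1) rest.length hVal 0 (by omega)
  have hconst : ∀ x : Int, 1 ≤ x → x < d0 →
      ((bTables L).getD rest.length #[]).getD (1 <<< x.toNat) 0
        = (Nat.descFactorial 9 rest.length : Int) := by
    intro x hx1 hx2
    obtain ⟨hpc1, hlt1⟩ := pcnt_one' x.toNat (by omega)
    rw [bTables_getD L rest.length (by omega), rowSeq_getD rest.length _ hlt1, rowVal, hpc1]
  -- the two inner folds agree
  have hfold :
      (PySem.List.pyRange (if ((0:Int) == 0) = true then 1 else 0) d0).foldl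
        (fun a x => if PySem.Set.contains PySem.Set.empty x = true then a
          else a + pvPerm (9 - (0:Int)) (((L : Nat) : Int) - 0 - 1)) (hVal rest.length)
      = (PySem.List.pyRange 0 d0).foldl
        (fun (t x : Int) => if (x == 0) = true then t + (bHList (bTables L) L).getD rest.length 0
          else t + ((bTables L).getD rest.length #[]).getD (1 <<< x.toNat) 0) 0 := by
    have hlo : (if ((0:Int) == 0) = true then (1:Int) else 0) = 1 := by simp
    rw [hlo]
    conv_rhs => rw [PySem.List.pyRange_one_cons (by omega : (0:Int) < d0), List.foldl_cons]
    have hzero : ((0:Int) == 0) = true := by simp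
    simp only [hzero, if_true, hhs, zero_add]
    apply PySem.List.foldl_congr_mem
    intro a x hx
    have hxb : 1 ≤ x ∧ x < d0 := PySem.List.mem_pyRange_one.mp hx
    have hx0 : (x == 0) = false := by simp; omega
    have hcemp : PySem.Set.contains PySem.Set.empty x = false := rfl
    simp only [hcemp, Bool.false_eq_true, if_false, hx0]
    rw [hconst x hxb.1 hxb.2]
    have hc1 : (9 : Int) - 0 = ((9 : Nat) : Int) := by norm_num
    have hc2 : ((L : Nat) : Int) - 0 - 1 = ((rest.length : Nat) : Int) := by
      rw [hL]; push_cast; ring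
    rw [hc1, hc2, pvPerm_eq 9 rest.length]
  rw [hfold]
  -- the trailing branch: A adds d0 to seen, B sets the bit and starts
  have hcd0 : PySem.Set.contains PySem.Set.empty d0 = false := rfl
  simp only [hcd0, Bool.false_eq_true, if_false, Nat.zero_add]
  have hone : (0 : Int) + 1 = ((1 : Nat) : Int) := by norm_num
  rw [hone]
  have hinv : ∀ x : Int, PySem.Set.contains (PySem.Set.add PySem.Set.empty d0) x = true ↔
      (0 ≤ x ∧ x < 10 ∧ Nat.testBit (1 <<< d0.toNat) x.toNat = true) := by
    have hbase : ∀ x : Int, PySem.Set.contains PySem.Set.empty x = true ↔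
        (0 ≤ x ∧ x < 10 ∧ Nat.testBit 0 x.toNat = true) := by
      intro x
      simp [Nat.zero_testBit]
    have := seen_invariant_step PySem.Set.empty 0 d0 ⟨by omega, h2⟩ hbase
    simpa [Nat.zero_or] using this
  exact loop_walk L rest 1 (1 <<< d0.toNat) (PySem.Set.add PySem.Set.empty d0) _ hr
    (by omega) (by omega) (pcnt_one' d0.toNat hd0nat).2 (pcnt_one' d0.toNat hd0nat).1 hinv

theorem main_eq (n : Int) (hn : -1 ≤ n) :
    numDupDigitsAtMostN n = numDupDigitsAtMostN_alt n := by
  by_cases h0 : n = -1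
  · subst h0; decide
  · have hn0 : 0 ≤ n := by omega
    obtain ⟨d0, rest, heq, h1, h2⟩ := digitsNat_head (n + 1).toNat (by omega)
    have hds : pyDigits (n + 1) = d0 :: rest := by rw [pyDigits_eq _ (by omega), heq]
    have hdig : ∀ e ∈ d0 :: rest, 0 ≤ e ∧ e < 10 := by
      rw [← heq]; exact digitsNat_mem (n + 1).toNat
    have hr : ∀ e ∈ rest, 0 ≤ e ∧ e < 10 := fun e he => hdig e (by simp [he])
    unfold numDupDigitsAtMostN numDupDigitsAtMostN_alt aCountUnique
    rw [hds]
    simp only [List.length_cons]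
    congr 1
    have huc : (PySem.List.pyRange 1 ((rest.length + 1 : Nat) : Int)).foldl
        (fun a i => a + 9 * pvPerm 9 (i - 1)) 0 = hVal rest.length := aSum_eq rest.length
    rw [huc]
    exact core_eq d0 rest h1 h2 hr

-- ===== VERDICT (by name: the statement is the Claim_ definition above) =====
theorem numDupDigitsAtMostN_spec : Claim_equal_numDupDigitsAtMostN := by
  intro n _ hpre
  show numDupDigitsAtMostN n = numDupDigitsAtMostN_alt n
  exact main_eq n hpre
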